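-- pv_equiv track=rewrite | github.com/panda-balarka/bounceTrading_screener | screener_backend/ipbAlgo.py | getNeg2Pos_CrossOverPosition
-- ===== SOURCE A (Python) =====
-- def getNeg2Pos_CrossOverPosition(valList):
--     try:
--         bool_list = []
--         for macdHistVal in valList:
--             bool_list.append(macdHistVal > 0)
--
--         if bool_list[-1]:
--             for traceIdx in range(len(bool_list)):
--                 if not(bool_list[-traceIdx-2]):
--                     return -traceIdx-2
--     except:
--         pass
-- ===== SOURCE B (Python) =====
-- def getNeg2Pos_CrossOverPosition(valList):
--     if not valList or valList[-1] <= 0: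
--         return None
--     result = None
--     n = len(valList)
--     for i in range(n - 1):
--         if valList[i] <= 0:
--             result = i - n
--     return result
-- ===== Notes on version B (the rewrite author's own statement) =====
-- stated objective: simpler
-- what changed: Replaces A's separately-built boolean list plus backward early-return scan (whose termination relies on a bare except swallowing an IndexError) with a single forward pass that accumulates the last non-positive offset i - len(valList); no exception handling, no auxiliary list.
import Mathlib
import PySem

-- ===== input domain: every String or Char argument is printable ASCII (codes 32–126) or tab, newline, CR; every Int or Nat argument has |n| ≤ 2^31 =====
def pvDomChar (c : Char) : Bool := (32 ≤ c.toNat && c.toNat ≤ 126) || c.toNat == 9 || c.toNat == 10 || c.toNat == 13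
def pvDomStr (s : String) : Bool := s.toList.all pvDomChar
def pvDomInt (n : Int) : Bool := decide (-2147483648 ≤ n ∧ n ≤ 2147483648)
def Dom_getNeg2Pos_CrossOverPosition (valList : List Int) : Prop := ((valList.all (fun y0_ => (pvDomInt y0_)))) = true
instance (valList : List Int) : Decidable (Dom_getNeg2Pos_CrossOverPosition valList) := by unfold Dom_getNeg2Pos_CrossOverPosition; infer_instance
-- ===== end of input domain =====

-- B replaces A's separately-built boolean list and backward early-return scan (terminated via a
-- bare except catching an IndexError) with a single forward pass accumulating the last
-- non-positive offset; same O(n) cost, no exception path.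

-- ===== PORT A =====
-- the backward scan 'for traceIdx in range(len(bool_list)): if not bool_list[-traceIdx-2]: return -traceIdx-2';
-- a pyGet? miss (IndexError) is caught by the bare 'except: pass', i.e. the whole call returns none
def pvALoop (bl : List Bool) (traceIdx : Nat) : Option Int :=
  if traceIdx < bl.length then
    match PySem.List.pyGet? bl (-(traceIdx : Int) - 2) with
    | none => none
    | some b => if b then pvALoop bl (traceIdx + 1) else some (-(traceIdx : Int) - 2)
  else none
termination_by bl.length - traceIdx

def getNeg2Pos_CrossOverPosition (valList : List Int) : Option Int :=
  -- bool_list = []; for macdHistVal in valList: bool_list.append(macdHistVal > 0)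
  let bool_list := valList.foldl (fun acc v => acc ++ [decide (0 < v)]) []
  -- if bool_list[-1]: … (IndexError on empty caught by 'except: pass' → None)
  match PySem.List.pyGet? bool_list (-1) with
  | none => none
  | some b => if b then pvALoop bool_list 0 else none

-- ===== PORT B =====
def getNeg2Pos_CrossOverPosition_alt (valList : List Int) : Option Int :=
  -- if not valList or valList[-1] <= 0: return None  (pyGet? (-1) is none exactly on the empty list)
  match PySem.List.pyGet? valList (-1) with
  | none => none
  | some last =>
    if last ≤ 0 then none
    else
      -- result = None; for i in range(n-1): if valList[i] <= 0: result = i - n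
      let n : Int := valList.length
      (PySem.List.pyRange 0 (n - 1) 1).foldl
        (fun result i => if PySem.List.pyGetD valList i 0 ≤ 0 then some (i - n) else result) none

-- ===== PRECONDITION & SPEC =====
def Spec_getNeg2Pos_CrossOverPosition (valList : List Int) (out : Option Int) : Prop := out = getNeg2Pos_CrossOverPosition_alt valList
instance (valList : List Int) (out : Option Int) : Decidable (Spec_getNeg2Pos_CrossOverPosition valList out) := by unfold Spec_getNeg2Pos_CrossOverPosition; infer_instance

-- ===== CLAIM (what is proved, stated in full; the proofs are below) =====
def Claim_equal_getNeg2Pos_CrossOverPosition : Prop := ∀ (valList : List Int), Dom_getNeg2Pos_CrossOverPosition valList → Spec_getNeg2Pos_CrossOverPosition valList (getNeg2Pos_CrossOverPosition valList)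

-- ===== LEMMAS AND PROOFS =====

-- A's backward scan from traceIdx t finds the first 'false' in bl.reverse.drop (t+1)
theorem pvALoop_eq (bl : List Bool) (t : Nat) :
    pvALoop bl t =
      match List.findIdx? (fun b => !b) (bl.reverse.drop (t + 1)) with
      | some k => some (-(t : Int) - (k : Int) - 2)
      | none => none := by
  fun_induction pvALoop bl t
  case case1 t ht hnone =>
    -- in range but pyGet? missed (IndexError): t + 2 > length
    have hgt : ¬ (t + 2 <= bl.length) := by
      intro hle
      have : PySem.List.pyGet? bl (-(t : Int) - 2) ≠ none := by
        rw [Ne, PySem.List.pyGet?_eq_none_iff]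
        simp [PySem.Raise.InRange]; omega
      exact this hnone
    have : bl.reverse.drop (t + 1) = [] := by
      apply List.drop_eq_nil_of_le; simp; omega
    simp [this]
  case case2 t ht hsome ih =>
    have hrange : t + 2 <= bl.length := by
      by_contra hlt
      have : PySem.List.pyGet? bl (-(t : Int) - 2) = none := by
        rw [PySem.List.pyGet?_eq_none_iff]
        simp [PySem.Raise.InRange]; omega
      simp [this] at hsome
    have hidx : bl.reverse.drop (t + 1) = bl.reverse[t + 1]'(by simp; omega) :: bl.reverse.drop (t + 2) := by
      rw [List.drop_eq_getElem_cons (by simp; omega)]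
    have hget : bl.reverse[t + 1]'(by simp; omega) = true := by
      have heq : PySem.List.pyGet? bl (-(t : Int) - 2) = bl[bl.length - (t + 2)]? := by
        have := PySem.List.pyGet?_neg_natCast (xs := bl) (k := t + 2) (by omega) (by omega)
        simpa [show -((t : Int) + 2) = -(t : Int) - 2 by ring] using this
      rw [heq] at hsome
      have hb' : bl[bl.length - (t + 2)]'(by omega) = true := by
        simpa [List.getElem?_eq_getElem (by omega : bl.length - (t+2) < bl.length)] using hsome
      simp [List.getElem_reverse, ← hb']
      congr 1; omega
    rw [ih, hidx, List.findIdx?_cons]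
    simp only [hget, Bool.not_true]
    cases List.findIdx? (fun b => !b) (bl.reverse.drop (t + 2)) with
    | none => simp
    | some k =>
      simp
      ring
  case case3 t ht b hsome hne =>
    have hb : b = false := by
      cases b
      · rfl
      · exact absurd rfl hne
    subst hb
    have hrange : t + 2 <= bl.length := by
      by_contra hlt
      have : PySem.List.pyGet? bl (-(t : Int) - 2) = none := by
        rw [PySem.List.pyGet?_eq_none_iff]
        simp [PySem.Raise.InRange]; omega
      simp [this] at hsome
    have hidx : bl.reverse.drop (t + 1) = bl.reverse[t + 1]'(by simp; omega) :: bl.reverse.drop (t + 2) := by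
      rw [List.drop_eq_getElem_cons (by simp; omega)]
    have hget : bl.reverse[t + 1]'(by simp; omega) = false := by
      have heq : PySem.List.pyGet? bl (-(t : Int) - 2) = bl[bl.length - (t + 2)]? := by
        have := PySem.List.pyGet?_neg_natCast (xs := bl) (k := t + 2) (by omega) (by omega)
        simpa [show -((t : Int) + 2) = -(t : Int) - 2 by ring] using this
      rw [heq] at hsome
      have hb' : bl[bl.length - (t + 2)]'(by omega) = false := by
        simpa [List.getElem?_eq_getElem (by omega : bl.length - (t+2) < bl.length)] using hsome
      simp [List.getElem_reverse, ← hb']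
      congr 1; omega
    rw [hidx, List.findIdx?_cons]
    simp [hget]
  case case4 t ht =>
    have : bl.reverse.drop (t + 1) = [] := by
      apply List.drop_eq_nil_of_le; simp; omega
    simp [this]

-- B's forward accumulating pass over range 0..m-1 keeps the LAST index i < m with xs[i] ≤ 0
theorem pvBFold_eq (xs : List Int) (n : Int) (m : Nat) (hm : m ≤ xs.length) :
    ∀ init : Option Int,
      (PySem.List.pyRange 0 (m : Int) 1).foldl
        (fun result i => if PySem.List.pyGetD xs i 0 ≤ 0 then some (i - n) else result) init =
      match List.findIdx? (fun v => decide (v ≤ 0)) ((xs.take m).reverse) with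
      | some k => some ((m : Int) - 1 - (k : Int) - n)
      | none => init := by
  induction m with
  | zero => intro init; simp [PySem.List.pyRange]
  | succ m ih =>
    intro init
    have hmlt : m < xs.length := by omega
    have hsplit : PySem.List.pyRange 0 ((m : Int) + 1) 1 = PySem.List.pyRange 0 (m : Int) 1 ++ [(m : Int)] := by
      exact PySem.List.pyRange_one_succ_right (by positivity)
    rw [show ((m + 1 : Nat) : Int) = (m : Int) + 1 by push_cast; ring, hsplit, List.foldl_append]
    simp only [List.foldl_cons, List.foldl_nil]
    have hgd : PySem.List.pyGetD xs (m : Int) 0 = xs[m] := by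
      rw [PySem.List.pyGetD_natCast]; exact List.getD_eq_getElem xs 0 hmlt
    have htake : (xs.take (m + 1)).reverse = xs[m] :: (xs.take m).reverse := by
      rw [List.take_add_one]
      simp [List.getElem?_eq_getElem hmlt]
    rw [htake, List.findIdx?_cons]
    by_cases hx : xs[m] ≤ 0
    · rw [ih (by omega) init]
      simp [hgd, hx]
    · rw [ih (by omega) init]
      cases List.findIdx? (fun v => decide (v ≤ 0)) ((xs.take m).reverse) with
      | none => simp [hgd, hx]
      | some k =>
        simp [hgd, hx]
        ring

-- ===== VERDICT (by name: the statement is the Claim_ definition above) =====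
theorem getNeg2Pos_CrossOverPosition_spec : Claim_equal_getNeg2Pos_CrossOverPosition := by
  intro valList _
  unfold Spec_getNeg2Pos_CrossOverPosition
  unfold getNeg2Pos_CrossOverPosition getNeg2Pos_CrossOverPosition_alt
  rw [PySem.List.foldl_append_singleton_eq_map]
  simp only [List.nil_append]
  set p : Int → Bool := fun v => decide (0 < v) with hp
  rw [PySem.List.pyGet?_neg_one, PySem.List.pyGet?_neg_one, List.getLast?_map]
  cases hlast : valList.getLast? with
  | none => simp
  | some last =>
    simp only [Option.map_some]
    by_cases hpos : 0 < last
    · have hple : ¬ (last ≤ 0) := by omega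
      simp only [hp, hpos, decide_true, if_true, hple, if_false]
      rw [pvALoop_eq]
      have hne : valList ≠ [] := by
        intro h; rw [h] at hlast; simp at hlast
      have hlen1 : 1 ≤ valList.length := List.length_pos_iff.mpr hne
      -- A side: bl.reverse.drop 1 = (valList.dropLast.map p).reverse
      have hA : (valList.map p).reverse.drop 1 = (valList.dropLast.reverse).map p := by
        rw [List.drop_one, List.tail_reverse]; simp
      -- B side
      have hBn : (valList.length : Int) - 1 = ((valList.length - 1 : Nat) : Int) := by omega
      rw [hBn, pvBFold_eq valList (valList.length : Int) (valList.length - 1) (by omega) none]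
      have htake : valList.take (valList.length - 1) = valList.dropLast := by
        rw [List.dropLast_eq_take]
      rw [htake, hA, List.findIdx?_map]
      have hpred : ((fun b => !b) ∘ p) = (fun v => decide (v ≤ 0)) := by
        funext v
        by_cases h : 0 < v <;> simp [hp, h]
        omega
      rw [hpred]
      cases h : List.findIdx? (fun v => decide (v ≤ 0)) valList.dropLast.reverse with
      | none => simp
      | some k =>
        simp only
        congr 1; omega
    · have hple : last ≤ 0 := by omega
      simp [hp, hpos, hple]
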